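-- pv_equiv track=rewrite | github.com/krudny/Algorithms-and-Data-Structures | BITAlgo Tasks/BITALGO4/3_amazon_stairs.py | amazon_stairs
-- ===== SOURCE A (Python) =====
-- def amazon_stairs(A):
--     n = len(A)
--     DP = [0] * n
--     DP[n-1] = 1
--
--     for i in range(n-2, -1, -1):
--         for j in range(1, A[i]+1):
--             if i+j < n:
--                 DP[i] += DP[i+j]
--
--     return DP[0]
-- ===== SOURCE B (Python) =====
-- def amazon_stairs(A):
--     # Suffix-sum DP: S[i] = DP[i] + DP[i+1] + ... + DP[n-1], built right-to-left,
--     # so each DP[i] is a window sum obtained in O(1) instead of an inner loop.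
--     n = len(A)
--     S = [0] * (n + 1)
--     S[n - 1] = 1
--     for i in range(n - 2, -1, -1):
--         a = A[i]
--         hi = min(i + a, n - 1)
--         dp = S[i + 1] - S[hi + 1] if a >= 1 else 0
--         S[i] = dp + S[i + 1]
--     return S[0] - S[1]
-- ===== Notes on version B (the rewrite author's own statement) =====
-- stated objective: faster
-- what changed: Replaces A's O(A[i]) inner summation loop per stair with a right-to-left suffix-sum array, so each DP value is obtained as a difference of two suffix sums in O(1).
import Mathlib
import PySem

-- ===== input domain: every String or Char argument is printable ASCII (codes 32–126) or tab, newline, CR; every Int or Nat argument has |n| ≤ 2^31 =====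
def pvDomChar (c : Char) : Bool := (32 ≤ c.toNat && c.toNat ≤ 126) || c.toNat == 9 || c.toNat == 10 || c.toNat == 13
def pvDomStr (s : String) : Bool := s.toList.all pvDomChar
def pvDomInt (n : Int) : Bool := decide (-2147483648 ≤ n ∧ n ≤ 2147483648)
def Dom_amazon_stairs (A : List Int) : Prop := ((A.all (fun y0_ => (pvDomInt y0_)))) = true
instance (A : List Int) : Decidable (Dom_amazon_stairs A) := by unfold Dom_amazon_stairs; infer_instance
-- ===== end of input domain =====

-- B replaces A's O(A[i]) inner summation loop by a right-to-left suffix-sum array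
-- (each DP value becomes a difference of two suffix sums, O(1) per stair).

-- ===== PORT A =====
-- loop body of A's outer 'for i in range(n-2, -1, -1)' (inner loop 'for j in range(1, A[i]+1)')
def pvStepA (A : List Int) (DP : List Int) (i : Int) : List Int :=
  (PySem.List.pyRange 1 (PySem.List.pyGetD A i 0 + 1) 1).foldl (fun D j =>
    if i + j < (A.length : Int) then
      PySem.List.pySetD D i (PySem.List.pyGetD D i 0 + PySem.List.pyGetD D (i + j) 0)
    else D) DP

def amazon_stairs (A : List Int) : Int :=
  let n : Int := A.length
  let DP : List Int := List.replicate A.length 0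
  let DP := PySem.List.pySetD DP (n - 1) 1
  let DP := (PySem.List.pyRange (n - 2) (-1) (-1)).foldl (pvStepA A) DP
  PySem.List.pyGetD DP 0 0

-- ===== PORT B =====
-- loop body of B's 'for i in range(n-2, -1, -1)'
def pvStepB (A : List Int) (S : List Int) (i : Int) : List Int :=
  let a := PySem.List.pyGetD A i 0
  let hi := min (i + a) ((A.length : Int) - 1)
  let dp := if 1 ≤ a then PySem.List.pyGetD S (i + 1) 0 - PySem.List.pyGetD S (hi + 1) 0 else 0
  PySem.List.pySetD S i (dp + PySem.List.pyGetD S (i + 1) 0)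

def amazon_stairs_alt (A : List Int) : Int :=
  let n : Int := A.length
  let S : List Int := List.replicate (A.length + 1) 0
  let S := PySem.List.pySetD S (n - 1) 1
  let S := (PySem.List.pyRange (n - 2) (-1) (-1)).foldl (pvStepB A) S
  PySem.List.pyGetD S 0 0 - PySem.List.pyGetD S 1 0

-- ===== PRECONDITION & SPEC =====
-- Pre_ excludes only the empty list, on which A raises IndexError (DP[n-1] with n = 0); B raises there too.
def Pre_amazon_stairs (A : List Int) : Prop := A ≠ []
instance (A : List Int) : Decidable (Pre_amazon_stairs A) := by unfold Pre_amazon_stairs; infer_instance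
def pvWitness_amazon_stairs : List Int := ([2, 1, 1])

def Spec_amazon_stairs (A : List Int) (out : Int) : Prop := out = amazon_stairs_alt A
instance (A : List Int) (out : Int) : Decidable (Spec_amazon_stairs A out) := by unfold Spec_amazon_stairs; infer_instance

-- ===== CLAIM (what is proved, stated in full; the proofs are below) =====
def Claim_equal_amazon_stairs : Prop := ∀ (A : List Int), Dom_amazon_stairs A → Pre_amazon_stairs A → Spec_amazon_stairs A (amazon_stairs A)

-- ===== LEMMAS AND PROOFS =====

-- Invariant: after the loops have processed indices A.length-2 … k,
-- DP holds A's path counts at indices ≥ k (0 below k), and S holds the suffix sums of DP at indices ≥ k.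
def pvInv (A DP S : List Int) (k : Nat) : Prop :=
  DP.length = A.length ∧ S.length = A.length + 1 ∧
  (∀ t, t < k → DP.getD t 0 = 0) ∧
  (∀ t, k ≤ t → t ≤ A.length → S.getD t 0 = (DP.drop t).sum)

lemma pv_drop_set_le (l : List Int) (k : Nat) (v : Int) (m : Nat) (h : k < m) :
    (l.set k v).drop m = l.drop m := by
  apply List.ext_getElem? (fun j => ?_)
  rw [List.getElem?_drop, List.getElem?_drop, List.getElem?_set_ne (by omega)]

lemma pv_inner_fold (nI : Int) : ∀ (js : List Int) (DP : List Int) (i : Nat),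
    (∀ j ∈ js, 1 ≤ j) → i < DP.length → nI ≤ (DP.length : Int) →
    js.foldl (fun D j =>
      if (i : Int) + j < nI then
        PySem.List.pySetD D (i : Int) (PySem.List.pyGetD D (i : Int) 0 + PySem.List.pyGetD D ((i : Int) + j) 0)
      else D) DP
    = DP.set i (DP.getD i 0 + (js.map (fun j => if (i : Int) + j < nI then PySem.List.pyGetD DP ((i : Int) + j) 0 else 0)).sum) := by
  intro js
  induction js with
  | nil =>
      intro DP i hjs hi hn
      simp only [List.foldl_nil, List.map_nil, List.sum_nil, add_zero]
      symm
      apply List.ext_getElem (by simp)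
      intro t h1 h2
      rw [List.getElem_set]
      split_ifs with hit
      · subst hit; rw [List.getD_eq_getElem DP 0 hi]
      · rfl
  | cons j js ih =>
      intro DP i hjs hi hn
      have hj : (1:Int) ≤ j := hjs j (by simp)
      simp only [List.foldl_cons, List.map_cons, List.sum_cons]
      by_cases hc : (i : Int) + j < nI
      · rw [if_pos hc, if_pos hc]
        have hset : PySem.List.pySetD DP (i : Int)
            (PySem.List.pyGetD DP (i : Int) 0 + PySem.List.pyGetD DP ((i : Int) + j) 0)
            = DP.set i (DP.getD i 0 + PySem.List.pyGetD DP ((i : Int) + j) 0) := by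
          simp [PySem.List.pySetD_natCast, PySem.List.pyGetD_natCast]
        rw [hset]
        rw [ih _ i (fun x hx => hjs x (by simp [hx])) (by simpa using hi) (by simpa using hn)]
        rw [List.set_set]
        congr 1
        have hgd : (DP.set i (DP.getD i 0 + PySem.List.pyGetD DP ((i : Int) + j) 0)).getD i 0
            = DP.getD i 0 + PySem.List.pyGetD DP ((i : Int) + j) 0 := by
          rw [List.getD_eq_getElem _ 0 (by simpa using hi), List.getElem_set_self]
        rw [hgd]
        have hmap : (js.map (fun j' => if (i : Int) + j' < nI then
            PySem.List.pyGetD (DP.set i (DP.getD i 0 + PySem.List.pyGetD DP ((i : Int) + j) 0)) ((i : Int) + j') 0 else 0))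
            = js.map (fun j' => if (i : Int) + j' < nI then PySem.List.pyGetD DP ((i : Int) + j') 0 else 0) := by
          apply List.map_congr_left
          intro x hx
          by_cases hcx : (i : Int) + x < nI
          · rw [if_pos hcx, if_pos hcx]
            have hx1 : (1:Int) ≤ x := hjs x (by simp [hx])
            have hidx : (i : Int) + x = ((i + x.toNat : Nat) : Int) := by omega
            rw [hidx, PySem.List.pyGetD_natCast, PySem.List.pyGetD_natCast]
            rw [List.getD_eq_getElem?_getD, List.getD_eq_getElem?_getD,
              List.getElem?_set_ne (by omega)]
            simp [List.getD_eq_getElem?_getD]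
          · rw [if_neg hcx, if_neg hcx]
        rw [hmap]
        ring
      · rw [if_neg hc, if_neg hc]
        rw [ih _ i (fun x hx => hjs x (by simp [hx])) hi hn]
        congr 1
        ring

lemma pv_window (DP : List Int) : ∀ (c : Nat) (t : Nat),
    ((List.range c).map (fun u => if t + u < DP.length then DP.getD (t + u) 0 else 0)).sum
    = ((DP.drop t).take c).sum := by
  intro c
  induction c with
  | zero => intro t; simp
  | succ c ih =>
      intro t
      rw [List.range_succ, List.map_append, List.sum_append, ih t]
      rw [List.take_add_one, List.sum_append]
      congr 1
      simp only [List.map_cons, List.map_nil, List.sum_cons, List.sum_nil, add_zero]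
      by_cases hc : t + c < DP.length
      · rw [if_pos hc]
        have : (DP.drop t)[c]? = some DP[t + c] := by
          rw [List.getElem?_drop]; exact List.getElem?_eq_getElem hc
        rw [this]
        simp [List.getD_eq_getElem?_getD, List.getElem?_eq_getElem hc]
      · rw [if_neg hc]
        have : (DP.drop t)[c]? = none := by
          rw [List.getElem?_drop]; exact List.getElem?_eq_none (by omega)
        rw [this]
        simp

-- difference of suffix sums is a window sum
lemma pv_sub_drop (l : List Int) (t m : Nat) :
    (l.drop t).sum - (l.drop (t + m)).sum = ((l.drop t).take m).sum := by
  have h2 : (l.drop t).drop m = l.drop (t + m) := by rw [List.drop_drop]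
  have h1 := congrArg List.sum (List.take_append_drop m (l.drop t)).symm
  rw [List.sum_append, h2] at h1
  omega

-- the guarded inner-loop sum of A is the window sum DP[k+1 .. k+a]
lemma pv_sumA (DP : List Int) (k : Nat) (a : Int) :
    ((PySem.List.pyRange 1 (a + 1) 1).map (fun j =>
        if (k : Int) + j < (DP.length : Int) then PySem.List.pyGetD DP ((k : Int) + j) 0 else 0)).sum
    = ((DP.drop (k + 1)).take a.toNat).sum := by
  rw [PySem.List.pyRange_one, List.map_map, ← pv_window DP a.toNat (k + 1),
    show a + 1 - 1 = a from by ring]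
  congr 1
  apply List.map_congr_left
  intro u _
  simp only [Function.comp_apply]
  by_cases hcu : (k + 1) + u < DP.length
  · rw [if_pos (by omega), if_pos hcu,
      show (1 : Int) + (u : Int) = ((1 + u : Nat) : Int) from by push_cast; ring,
      show (k : Int) + ((1 + u : Nat) : Int) = (((k + 1) + u : Nat) : Int) from by push_cast; ring,
      PySem.List.pyGetD_natCast]
  · rw [if_neg (by omega), if_neg hcu]

lemma pv_step (A DP S : List Int) (k : Nat) (hk : k + 1 ≤ A.length - 1) (hn : A ≠ [])
    (h : pvInv A DP S (k + 1)) : pvInv A (pvStepA A DP (k : Int)) (pvStepB A S (k : Int)) k := by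
  obtain ⟨hDPlen, hSlen, hDP0, hS⟩ := h
  have hn1 : 1 ≤ A.length := List.length_pos_of_ne_nil hn
  have hk2 : k + 2 ≤ A.length := by omega
  have hkD : k < DP.length := by omega
  have hkS : k < S.length := by omega
  -- the common window sum
  have hA' : pvStepA A DP (k : Int)
      = DP.set k (0 + ((DP.drop (k + 1)).take (PySem.List.pyGetD A (k : Int) 0).toNat).sum) := by
    unfold pvStepA
    rw [pv_inner_fold (A.length : Int) _ DP k
      (fun j hj => (PySem.List.mem_pyRange_one.1 hj).1) hkD (by omega)]
    rw [hDP0 k (by omega), show ((A.length : Int)) = ((DP.length : Int)) from by rw [hDPlen],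
      pv_sumA DP k (PySem.List.pyGetD A (k : Int) 0)]
  have hSk1 : PySem.List.pyGetD S ((k : Int) + 1) 0 = (DP.drop (k + 1)).sum := by
    rw [show (k : Int) + 1 = ((k + 1 : Nat) : Int) from by push_cast; ring,
      PySem.List.pyGetD_natCast]
    exact hS (k + 1) le_rfl (by omega)
  have hdp : (if 1 ≤ PySem.List.pyGetD A (k : Int) 0 then
        PySem.List.pyGetD S ((k : Int) + 1) 0 -
          PySem.List.pyGetD S (min ((k : Int) + PySem.List.pyGetD A (k : Int) 0) ((A.length : Int) - 1) + 1) 0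
      else 0)
      = ((DP.drop (k + 1)).take (PySem.List.pyGetD A (k : Int) 0).toNat).sum := by
    set a : Int := PySem.List.pyGetD A (k : Int) 0 with ha
    by_cases hc : 1 ≤ a
    · rw [if_pos hc]
      rcases le_total ((k : Int) + a) ((A.length : Int) - 1) with hm | hm
      · -- hi = k + a, window is the full a entries
        rw [min_eq_left hm,
          show (k : Int) + a + 1 = (((k + 1) + a.toNat : Nat) : Int) from by push_cast; omega,
          PySem.List.pyGetD_natCast, hSk1, hS ((k + 1) + a.toNat) (by omega) (by omega),
          pv_sub_drop DP (k + 1) a.toNat]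
      · -- hi = n - 1, window saturates: both takes cover the whole suffix
        rw [min_eq_right hm,
          show (A.length : Int) - 1 + 1 = ((A.length : Nat) : Int) from by push_cast; ring,
          PySem.List.pyGetD_natCast, hSk1, hS A.length (by omega) le_rfl,
          show A.length = (k + 1) + (A.length - (k + 1)) from by omega,
          pv_sub_drop DP (k + 1) (A.length - (k + 1))]
        rw [List.take_of_length_le (by rw [List.length_drop]; omega),
          List.take_of_length_le (by rw [List.length_drop]; omega)]
    · rw [if_neg hc, show a.toNat = 0 from by omega]
      simp
  have hB' : pvStepB A S (k : Int)
      = S.set k (((DP.drop (k + 1)).take (PySem.List.pyGetD A (k : Int) 0).toNat).sum + (DP.drop (k + 1)).sum) := by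
    show PySem.List.pySetD S (k : Int)
        ((if 1 ≤ PySem.List.pyGetD A (k : Int) 0 then
            PySem.List.pyGetD S ((k : Int) + 1) 0 -
              PySem.List.pyGetD S (min ((k : Int) + PySem.List.pyGetD A (k : Int) 0) ((A.length : Int) - 1) + 1) 0
          else 0) + PySem.List.pyGetD S ((k : Int) + 1) 0) = _
    rw [hdp, hSk1, PySem.List.pySetD_natCast]
  rw [hA', hB']
  refine ⟨by simp [hDPlen], by simp [hSlen], ?_, ?_⟩
  · intro t ht
    rw [List.getD_eq_getElem?_getD, List.getElem?_set_ne (by omega), ← List.getD_eq_getElem?_getD]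
    exact hDP0 t (by omega)
  · intro t ht1 ht2
    rcases eq_or_lt_of_le ht1 with rfl | htk
    · -- t = k
      have hdropk : ∀ v : Int, (DP.set k v).drop k = v :: DP.drop (k + 1) := by
        intro v
        rw [List.drop_eq_getElem_cons
          (show k < (DP.set k v).length by rw [List.length_set]; omega)]
        rw [List.getElem_set_self, pv_drop_set_le DP k v (k + 1) (by omega)]
      rw [List.getD_eq_getElem _ 0 (by rw [List.length_set]; omega), List.getElem_set_self,
        hdropk, List.sum_cons]
      ring
    · -- t > k
      rw [List.getD_eq_getElem?_getD, List.getElem?_set_ne (by omega), ← List.getD_eq_getElem?_getD,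
        pv_drop_set_le DP k _ t (by omega)]
      exact hS t (by omega) ht2

lemma pv_loop (A : List Int) (hn : A ≠ []) : ∀ (k : Nat) (DP S : List Int), k ≤ A.length - 1 → pvInv A DP S k →
    pvInv A ((PySem.List.pyRange ((k : Int) - 1) (-1) (-1)).foldl (pvStepA A) DP)
            ((PySem.List.pyRange ((k : Int) - 1) (-1) (-1)).foldl (pvStepB A) S) 0 := by
  intro k
  induction k with
  | zero =>
      intro DP S _ h
      rw [PySem.List.pyRange_neg_one_eq_nil (by omega)]
      simpa using h
  | succ k ih =>
      intro DP S hk h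
      have hcons : PySem.List.pyRange (((k + 1 : Nat) : Int) - 1) (-1) (-1)
          = (k : Int) :: PySem.List.pyRange ((k : Int) - 1) (-1) (-1) := by
        push_cast
        rw [PySem.List.pyRange_neg_one_cons (by omega)]
        ring_nf
      rw [hcons]
      simp only [List.foldl_cons]
      exact ih _ _ (by omega) (pv_step A DP S k hk hn h)

-- ===== VERDICT (by name: the statement is the Claim_ definition above) =====
theorem amazon_stairs_spec : Claim_equal_amazon_stairs := by
  intro A _ hPre
  have hn1 : 1 ≤ A.length := List.length_pos_of_ne_nil hPre
  unfold Spec_amazon_stairs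
  have hinit : pvInv A ((List.replicate A.length (0 : Int)).set (A.length - 1) 1)
      ((List.replicate (A.length + 1) (0 : Int)).set (A.length - 1) 1) (A.length - 1) := by
    refine ⟨by simp, by simp, ?_, ?_⟩
    · intro t ht
      rw [List.getD_eq_getElem?_getD, List.getElem?_set_ne (by omega), List.getElem?_replicate]
      split <;> rfl
    · intro t ht1 ht2
      have : t = A.length - 1 ∨ t = A.length := by omega
      rcases this with rfl | rfl
      · rw [List.getD_eq_getElem _ 0
          (by rw [List.length_set, List.length_replicate]; omega), List.getElem_set_self]
        have hd : ((List.replicate A.length (0 : Int)).set (A.length - 1) 1).drop (A.length - 1)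
            = 1 :: (List.replicate A.length (0 : Int)).drop (A.length - 1 + 1) := by
          rw [List.drop_eq_getElem_cons (show A.length - 1 <
              ((List.replicate A.length (0 : Int)).set (A.length - 1) 1).length by
                rw [List.length_set, List.length_replicate]; omega)]
          rw [List.getElem_set_self, pv_drop_set_le _ _ _ _ (by omega)]
        rw [hd, show A.length - 1 + 1 = A.length from by omega, List.drop_replicate]
        simp
      · rw [List.getD_eq_getElem?_getD, List.getElem?_set_ne (by omega)]
        rw [pv_drop_set_le _ _ _ _ (by omega), List.drop_replicate]
        simp [List.getElem?_replicate]
  have hloop := pv_loop A hPre (A.length - 1) _ _ le_rfl hinit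
  rw [show (((A.length - 1 : Nat) : Int) - 1) = ((A.length : Int) - 2) from by omega] at hloop
  obtain ⟨hL1, _, _, hSf⟩ := hloop
  simp only [amazon_stairs, amazon_stairs_alt]
  rw [show ((A.length : Int) - 1) = (((A.length - 1 : Nat) : Int)) from by omega,
    PySem.List.pySetD_natCast, PySem.List.pySetD_natCast]
  set DPf := (PySem.List.pyRange ((A.length : Int) - 2) (-1) (-1)).foldl (pvStepA A)
    ((List.replicate A.length (0 : Int)).set (A.length - 1) 1) with hDPf
  set Sf := (PySem.List.pyRange ((A.length : Int) - 2) (-1) (-1)).foldl (pvStepB A)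
    ((List.replicate (A.length + 1) (0 : Int)).set (A.length - 1) 1) with hSfdef
  have e0 : PySem.List.pyGetD DPf 0 0 = DPf.getD 0 0 := PySem.List.pyGetD_zero DPf 0
  have e1 : PySem.List.pyGetD Sf 0 0 = Sf.getD 0 0 := PySem.List.pyGetD_zero Sf 0
  have e2 : PySem.List.pyGetD Sf 1 0 = Sf.getD 1 0 := by
    rw [show (1 : Int) = ((1 : Nat) : Int) from by norm_cast, PySem.List.pyGetD_natCast]
  rw [e0, e1, e2, hSf 0 le_rfl (by omega), hSf 1 (by omega) (by omega)]
  clear_value DPf Sf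
  cases DPf with
  | nil => simp at hL1; omega
  | cons x xs => simp
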